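-- pv_equiv track=rewrite | github.com/Attler/scispacy | scispacy/data_util.py | _handle_sentence
-- ===== SOURCE A (Python) =====
-- from typing import NamedTuple, List, Iterator, Dict, Tuple
--
-- SpacyNerExample = Tuple[str, Dict[str, List[Tuple[int, int, str]]]] # pylint: disable=invalid-name
--
-- def _handle_sentence(examples: List[Tuple[str, str]]) -> SpacyNerExample:
--     """
--     Processes a single sentence by building it up as a space separated string
--     with its corresponding typed entity spans.
--     """
--     start_index = -1
--     current_index = 0
--     in_entity = False
--     entity_type: str = ""
--     sent = ""
--     entities: List[Tuple[int, int, str]] = []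
--     for word, entity in examples:
--         sent += word
--         sent += " "
--         if entity != 'O':
--             if in_entity:
--                 pass
--             else:
--                 start_index = current_index
--                 in_entity = True
--                 entity_type = entity[2:].upper()
--         else:
--             if in_entity:
--                 end_index = current_index - 1
--                 entities.append((start_index, end_index, entity_type))
--             in_entity = False
--             entity_type = ""
--             start_index = -1
--         current_index += (len(word) + 1)
--     if in_entity:
--         end_index = current_index - 1
--         entities.append((start_index, end_index, entity_type))
--
--     # Remove last space.
--     sent = sent[:-1]
--     return (sent, {'entities': entities})
-- ===== SOURCE B (Python) =====
-- def _handle_sentence(examples):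
--     words = [w for w, _ in examples]
--     tags = [t for _, t in examples]
--     sent = " ".join(words)
--     offsets = []
--     off = 0
--     for w in words:
--         offsets.append(off)
--         off += len(w) + 1
--     entities = []
--     i = 0
--     n = len(words)
--     while i < n:
--         if tags[i] == 'O':
--             i += 1
--         else:
--             j = i
--             while j + 1 < n and tags[j + 1] != 'O':
--                 j += 1
--             entities.append((offsets[i], offsets[j] + len(words[j]), tags[i][2:].upper()))
--             i = j + 1
--     return (sent, {'entities': entities})
-- ===== Notes on version B (the rewrite author's own statement) =====
-- stated objective: alternative
-- what changed: Replaces the single-pass boolean in_entity state machine with a join for the sentence, a precomputed per-word offset list, and explicit run detection (outer/inner index loops) over the tag list.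
import Mathlib
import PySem

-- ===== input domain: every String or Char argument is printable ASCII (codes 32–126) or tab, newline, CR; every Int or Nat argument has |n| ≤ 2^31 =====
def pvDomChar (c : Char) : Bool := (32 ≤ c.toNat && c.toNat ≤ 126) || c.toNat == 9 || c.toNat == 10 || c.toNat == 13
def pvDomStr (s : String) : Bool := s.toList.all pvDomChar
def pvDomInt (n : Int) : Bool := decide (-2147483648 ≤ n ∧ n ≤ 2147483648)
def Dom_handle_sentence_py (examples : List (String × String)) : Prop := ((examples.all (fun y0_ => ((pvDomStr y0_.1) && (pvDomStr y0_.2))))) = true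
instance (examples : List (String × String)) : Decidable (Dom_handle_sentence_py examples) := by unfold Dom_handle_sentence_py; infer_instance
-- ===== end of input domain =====

-- B replaces A's in_entity state machine with a join, precomputed per-word offsets and
-- explicit run detection (alternative decomposition, same cost); return values proved equal.

-- ===== PORT A =====
-- A's loop body; the growing sentence is carried as its code-point list (exact: Python
-- strings are sequences of code points), state = (start_index, current_index, in_entity,
-- entity_type, sent, entities).
def pyStepA (st : Int × Int × Bool × String × List Char × List (Int × Int × String))
    (we : String × String) : Int × Int × Bool × String × List Char × List (Int × Int × String) :=
  let (start_index, current_index, in_entity, entity_type, sent, entities) := st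
  let sent := sent ++ we.1.toList ++ [' ']
  if we.2 ≠ "O" then
    if in_entity then
      (start_index, current_index + (PySem.Str.len we.1 + 1), in_entity, entity_type, sent, entities)
    else
      (current_index, current_index + (PySem.Str.len we.1 + 1), true,
        PySem.Str.upper (PySem.Str.slice we.2 (some 2) none), sent, entities)
  else
    let entities := if in_entity then entities ++ [(start_index, current_index - 1, entity_type)] else entities
    (-1, current_index + (PySem.Str.len we.1 + 1), false, "", sent, entities)

def handle_sentence_py (examples : List (String × String)) :
    String × (List (String × List (Int × Int × String))) :=
  let st := examples.foldl pyStepA (-1, 0, false, "", [], [])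
  let (start_index, current_index, in_entity, entity_type, sent, entities) := st
  let entities := if in_entity then entities ++ [(start_index, current_index - 1, entity_type)] else entities
  -- sent = sent[:-1]
  (String.ofList (PySem.List.slice sent none (some (-1))), [("entities", entities)])

-- ===== PORT B =====
-- inner while: advance over consecutive non-'O' tokens, returning the last (offset, word)
-- of the run and the remaining positions.
def altRun (off : Int) (w : String) : List (Int × String × String) → Int × String × List (Int × String × String)
  | [] => (off, w, [])
  | (o2, w2, t2) :: rest => if t2 ≠ "O" then altRun o2 w2 rest else (off, w, (o2, w2, t2) :: rest)

theorem altRun_length_le (off : Int) (w : String) (l : List (Int × String × String)) :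
    (altRun off w l).2.2.length ≤ l.length := by
  induction l generalizing off w with
  | nil => simp [altRun]
  | cons h rest ih =>
    obtain ⟨o2, w2, t2⟩ := h
    simp only [altRun]
    split
    · exact le_trans (ih o2 w2) (Nat.le_succ _)
    · simp

-- outer while: skip 'O' positions, emit one span per run of non-'O' positions.
def altScan : List (Int × String × String) → List (Int × Int × String)
  | [] => []
  | (off, w, t) :: rest =>
    if t = "O" then altScan rest
    else
      let r := altRun off w rest
      (off, r.1 + PySem.Str.len r.2.1, PySem.Str.upper (PySem.Str.slice t (some 2) none)) :: altScan r.2.2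
termination_by l => l.length
decreasing_by
  · simp
  · simp only [List.length_cons]
    exact Nat.lt_succ_of_le (altRun_length_le off w rest)

def handle_sentence_py_alt (examples : List (String × String)) :
    String × (List (String × List (Int × Int × String))) :=
  let words := examples.map Prod.fst
  let tags := examples.map Prod.snd
  let sent := PySem.Str.join " " words
  let offsets := (words.foldl (fun (p : Int × List Int) w => (p.1 + (PySem.Str.len w + 1), p.2 ++ [p.1])) (0, [])).2
  let entities := altScan (offsets.zip (words.zip tags))
  (sent, [("entities", entities)])

-- ===== PRECONDITION & SPEC =====
def Spec_handle_sentence_py (examples : List (String × String)) (out : String × (List (String × List (Int × Int × String)))) : Prop := out = handle_sentence_py_alt examples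
instance (examples : List (String × String)) (out : String × (List (String × List (Int × Int × String)))) : Decidable (Spec_handle_sentence_py examples out) := by unfold Spec_handle_sentence_py; infer_instance

-- ===== CLAIM (what is proved, stated in full; the proofs are below) =====
def Claim_equal_handle_sentence_py : Prop := ∀ (examples : List (String × String)), Dom_handle_sentence_py examples → Spec_handle_sentence_py examples (handle_sentence_py examples)

-- ===== LEMMAS AND PROOFS =====

-- the (offset, word, tag) triples starting at offset `cur`
def mkTriples (cur : Int) : List (String × String) → List (Int × String × String)
  | [] => []
  | (w, t) :: rest => (cur, w, t) :: mkTriples (cur + (PySem.Str.len w + 1)) rest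

-- the raw sentence: every word followed by one space
def rawSent (l : List (String × String)) : List Char :=
  (l.map (fun we => we.1.toList ++ [' '])).flatten

@[simp] theorem rawSent_nil : rawSent [] = [] := rfl
@[simp] theorem rawSent_cons (we : String × String) (l : List (String × String)) :
    rawSent (we :: l) = we.1.toList ++ [' '] ++ rawSent l := by simp [rawSent]

@[simp] theorem altRun_nil (off : Int) (w : String) : altRun off w [] = (off, w, []) := rfl

theorem altRun_cons_of_ne (off : Int) (w : String) (o2 : Int) (w2 t2 : String)
    (rest : List (Int × String × String)) (h : t2 ≠ "O") :
    altRun off w ((o2, w2, t2) :: rest) = altRun o2 w2 rest := by simp [altRun, h]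

theorem altRun_cons_of_O (off : Int) (w : String) (o2 : Int) (w2 : String)
    (rest : List (Int × String × String)) :
    altRun off w ((o2, w2, "O") :: rest) = (off, w, (o2, w2, "O") :: rest) := by simp [altRun]

@[simp] theorem altScan_nil : altScan [] = [] := by rw [altScan]

theorem altScan_cons_of_O (off : Int) (w : String) (rest : List (Int × String × String)) :
    altScan ((off, w, "O") :: rest) = altScan rest := by rw [altScan]; simp

theorem altScan_cons_of_ne (off : Int) (w t : String) (rest : List (Int × String × String))
    (h : t ≠ "O") :
    altScan ((off, w, t) :: rest)
      = (off, (altRun off w rest).1 + PySem.Str.len (altRun off w rest).2.1,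
          PySem.Str.upper (PySem.Str.slice t (some 2) none)) :: altScan (altRun off w rest).2.2 := by
  rw [altScan]; simp [h]

theorem offsets_fold (l : List String) (cur : Int) (acc : List Int) :
    (l.foldl (fun (p : Int × List Int) w => (p.1 + (PySem.Str.len w + 1), p.2 ++ [p.1])) (cur, acc)).2
      = acc ++ (l.foldl (fun (p : Int × List Int) w => (p.1 + (PySem.Str.len w + 1), p.2 ++ [p.1])) (cur, [])).2 := by
  induction l generalizing cur acc with
  | nil => simp
  | cons w rest ih =>
    simp only [List.foldl_cons]
    rw [ih _ (acc ++ [cur]), ih _ ([] ++ [cur])]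
    simp

theorem zip_offsets (l : List (String × String)) (cur : Int) :
    ((l.map Prod.fst).foldl (fun (p : Int × List Int) w => (p.1 + (PySem.Str.len w + 1), p.2 ++ [p.1])) (cur, [])).2.zip
        ((l.map Prod.fst).zip (l.map Prod.snd)) = mkTriples cur l := by
  induction l generalizing cur with
  | nil => simp [mkTriples]
  | cons we rest ih =>
    obtain ⟨w, t⟩ := we
    simp only [List.map_cons, List.foldl_cons, mkTriples]
    rw [offsets_fold]
    simp only [List.nil_append, List.singleton_append, List.zip_cons_cons]
    rw [ih]

theorem join_chars (ws : List String) :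
    PySem.Chars.join [' '] (ws.map String.toList)
      = ((ws.map (fun w => w.toList ++ [' '])).flatten).dropLast := by
  induction ws with
  | nil => simp [PySem.Chars.join_nil]
  | cons w rest ih =>
    cases rest with
    | nil => simp [PySem.Chars.join_singleton]
    | cons w2 r2 =>
      simp only [List.map_cons] at *
      have hne : ((w2.toList ++ [' ']) :: List.map (fun w => w.toList ++ [' ']) r2).flatten ≠ [] := by
        simp [List.flatten_cons]
      rw [PySem.Chars.join_cons_cons, ih]
      conv_rhs => rw [List.flatten_cons, List.dropLast_append_of_ne_nil hne, List.flatten_cons]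
      simp [List.append_assoc]

theorem join_words (l : List (String × String)) :
    (PySem.Str.join " " (l.map Prod.fst)).toList = (rawSent l).dropLast := by
  rw [PySem.Str.toList_join, show (" " : String).toList = [' '] from rfl, join_chars]
  simp [rawSent, Function.comp_def]

-- finish: apply A's trailing flush (on raw components)
def finishA (st : Int × Int × Bool × String × List Char × List (Int × Int × String)) :
    List Char × List (Int × Int × String) :=
  let (start_index, current_index, in_entity, entity_type, sent, entities) := st
  (sent, if in_entity then entities ++ [(start_index, current_index - 1, entity_type)] else entities)

theorem pyStepA_O (st : Int) (cur : Int) (inE : Bool) (et : String) (sent : List Char)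
    (ents : List (Int × Int × String)) (w : String) :
    pyStepA (st, cur, inE, et, sent, ents) (w, "O")
      = (-1, cur + (PySem.Str.len w + 1), false, "",
          sent ++ w.toList ++ [' '],
          if inE then ents ++ [(st, cur - 1, et)] else ents) := by
  simp [pyStepA]

theorem pyStepA_ne_false (st : Int) (cur : Int) (et : String) (sent : List Char)
    (ents : List (Int × Int × String)) (w t : String) (h : t ≠ "O") :
    pyStepA (st, cur, false, et, sent, ents) (w, t)
      = (cur, cur + (PySem.Str.len w + 1), true,
          PySem.Str.upper (PySem.Str.slice t (some 2) none),
          sent ++ w.toList ++ [' '], ents) := by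
  simp [pyStepA, h]

theorem pyStepA_ne_true (st : Int) (cur : Int) (et : String) (sent : List Char)
    (ents : List (Int × Int × String)) (w t : String) (h : t ≠ "O") :
    pyStepA (st, cur, true, et, sent, ents) (w, t)
      = (st, cur + (PySem.Str.len w + 1), true, et,
          sent ++ w.toList ++ [' '], ents) := by
  simp [pyStepA, h]

-- the main simultaneous invariant: A's fold from an out-of-entity state matches altScan,
-- and from an in-entity state matches altRun followed by altScan.
theorem main_inv (l : List (String × String)) :
    (∀ (s0 : Int) (cur : Int) (e0 : String) (sent : List Char) (ents : List (Int × Int × String)),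
      finishA (l.foldl pyStepA (s0, cur, false, e0, sent, ents))
        = (sent ++ rawSent l, ents ++ altScan (mkTriples cur l)))
    ∧
    (∀ (off : Int) (w : String) (start : Int) (etype : String) (sent : List Char) (ents : List (Int × Int × String)),
      finishA (l.foldl pyStepA (start, off + (PySem.Str.len w + 1), true, etype, sent, ents))
        = (sent ++ rawSent l,
           ents ++ ((start, (altRun off w (mkTriples (off + (PySem.Str.len w + 1)) l)).1
                              + PySem.Str.len (altRun off w (mkTriples (off + (PySem.Str.len w + 1)) l)).2.1, etype)
                    :: altScan (altRun off w (mkTriples (off + (PySem.Str.len w + 1)) l)).2.2))) := by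
  induction l with
  | nil =>
    constructor
    · intro s0 cur e0 sent ents
      simp [finishA, mkTriples]
    · intro off w start etype sent ents
      simp only [List.foldl_nil, finishA, mkTriples, altRun_nil, altScan_nil]
      simp
      ring_nf
  | cons we rest ih =>
    obtain ⟨w1, t1⟩ := we
    obtain ⟨ihF, ihT⟩ := ih
    constructor
    · intro s0 cur e0 sent ents
      by_cases h : t1 = "O"
      · subst h
        simp only [List.foldl_cons, pyStepA_O]
        rw [ihF]
        simp [mkTriples, altScan_cons_of_O]
      · simp only [List.foldl_cons, pyStepA_ne_false _ _ _ _ _ _ _ h]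
        rw [ihT]
        simp only [mkTriples, altScan_cons_of_ne _ _ _ _ h]
        simp
    · intro off w start etype sent ents
      by_cases h : t1 = "O"
      · subst h
        simp only [List.foldl_cons, pyStepA_O]
        rw [ihF]
        simp only [mkTriples, altRun_cons_of_O, altScan_cons_of_O]
        simp
        omega
      · simp only [List.foldl_cons, pyStepA_ne_true _ _ _ _ _ _ _ h]
        rw [ihT]
        simp only [mkTriples, altRun_cons_of_ne _ _ _ _ _ _ h]
        simp

theorem A_closed (examples : List (String × String)) :
    handle_sentence_py examples
      = (String.ofList ((rawSent examples).dropLast),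
          [("entities", altScan (mkTriples 0 examples))]) := by
  have h := (main_inv examples).1 (-1) 0 "" [] []
  unfold handle_sentence_py
  rcases hfold : examples.foldl pyStepA (-1, 0, false, "", [], []) with ⟨s, c, b, e, sent, ents⟩
  rw [hfold] at h
  simp only [finishA, List.nil_append, Prod.mk.injEq] at h
  obtain ⟨h1, h2⟩ := h
  subst h1
  dsimp only
  rw [PySem.List.slice_to_neg_one, h2]

theorem B_closed (examples : List (String × String)) :
    handle_sentence_py_alt examples
      = (PySem.Str.join " " (examples.map Prod.fst),
          [("entities", altScan (mkTriples 0 examples))]) := by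
  unfold handle_sentence_py_alt
  dsimp only
  rw [zip_offsets]

-- ===== VERDICT (by name: the statement is the Claim_ definition above) =====
theorem handle_sentence_py_spec : Claim_equal_handle_sentence_py := by
  intro examples _
  unfold Spec_handle_sentence_py
  rw [A_closed, B_closed]
  refine Prod.ext ?_ rfl
  apply String.toList_inj.mp
  rw [join_words]
  simp
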